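-- pv_equiv track=rewrite | github.com/giridharan-1129/Multi-agent-MCP | src/gateway/routes/graph_visualization.py | _extract_all_entities
-- ===== SOURCE A (Python) =====
-- from typing import Any, List, Dict
--
-- def _extract_all_entities(query_results: List[Dict]) -> Dict[str, List[str]]:
--     """
--     Extract all unique entities from query results.
--     """
--     entities = {
--         "classes": set(),
--         "functions": set(),
--         "methods": set(),
--         "modules": set(),
--         "files": set()
--     }
--
--     for result in query_results:
--         if not isinstance(result, dict):
--             continue
--
--         # Extract names and types from various result structures
--         for key, val in result.items():
--             # Only process string values
--             if not isinstance(val, str):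
--                 continue
--             if not val or val == "None":
--                 continue
--
--             if key in ['c', 'name', 'target', 'source']:
--                 entities["classes"].add(val)
--             elif key == 'module':
--                 entities["modules"].add(val)
--             elif 'function' in key.lower():
--                 entities["functions"].add(val)
--             elif 'method' in key.lower():
--                 entities["methods"].add(val)
--
--     # Convert sets to sorted lists
--     return {k: sorted(list(v)) for k, v in entities.items()}
-- ===== SOURCE B (Python) =====
-- from typing import Any, List, Dict
--
-- def _extract_all_entities(query_results: List[Dict]) -> Dict[str, List[str]]:
--     """Extract all unique entities from query results (flatten + classify + per-category passes)."""
--     pairs = [(k, v) for r in query_results if isinstance(r, dict)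
--              for k, v in r.items()
--              if isinstance(v, str) and v and v != "None"]
--
--     def category(key):
--         if key in ('c', 'name', 'target', 'source'):
--             return "classes"
--         if key == 'module':
--             return "modules"
--         kl = key.lower()
--         if 'function' in kl:
--             return "functions"
--         if 'method' in kl:
--             return "methods"
--         return None
--
--     return {cat: sorted(dict.fromkeys(v for k, v in pairs if category(k) == cat))
--             for cat in ("classes", "functions", "methods", "modules", "files")}
-- ===== Notes on version B (the rewrite author's own statement) =====
-- stated objective: alternative
-- what changed: A makes one pass mutating five category sets through an if/elif chain; B flattens all valid (key,value) pairs once, factors the priority chain into a pure key->category classifier, and builds each category independently by filter + ordered dedup (dict.fromkeys) + sort.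
import Mathlib
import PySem

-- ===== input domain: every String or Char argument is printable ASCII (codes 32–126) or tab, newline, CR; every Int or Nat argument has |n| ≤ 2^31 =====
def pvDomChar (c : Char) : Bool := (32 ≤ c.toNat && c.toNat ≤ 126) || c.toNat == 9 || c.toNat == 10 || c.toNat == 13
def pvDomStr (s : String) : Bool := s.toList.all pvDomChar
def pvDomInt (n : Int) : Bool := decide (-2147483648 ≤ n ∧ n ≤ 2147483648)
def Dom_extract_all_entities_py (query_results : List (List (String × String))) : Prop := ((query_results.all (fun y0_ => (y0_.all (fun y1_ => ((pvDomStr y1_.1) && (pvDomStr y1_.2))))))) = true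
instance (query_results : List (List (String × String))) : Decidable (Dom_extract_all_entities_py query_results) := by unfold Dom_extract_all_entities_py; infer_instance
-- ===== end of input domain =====

-- B replaces A's single mutating pass over five sets by: flatten valid pairs once, a pure key->category
-- classifier, and an independent filter + ordered-dedup + sort pass per category (objective: alternative).


-- ===== PORT A =====
-- A's loop body: state is the entities dict's five sets (classes, functions, methods, modules);
-- "files" is never added to, so it is kept implicitly as the empty set.
def pvStepA (st : PySem.Set String × PySem.Set String × PySem.Set String × PySem.Set String)
    (kv : String × String) :
    PySem.Set String × PySem.Set String × PySem.Set String × PySem.Set String :=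
  let key := kv.1
  let val := kv.2
  -- if not val or val == "None": continue
  if val == "" || val == "None" then st
  else if key == "c" || key == "name" || key == "target" || key == "source" then
    (PySem.Set.add st.1 val, st.2.1, st.2.2.1, st.2.2.2)
  else if key == "module" then
    (st.1, st.2.1, st.2.2.1, PySem.Set.add st.2.2.2 val)
  else if PySem.Str.isIn "function" (PySem.Str.lower key) then
    (st.1, PySem.Set.add st.2.1 val, st.2.2.1, st.2.2.2)
  else if PySem.Str.isIn "method" (PySem.Str.lower key) then
    (st.1, st.2.1, PySem.Set.add st.2.2.1 val, st.2.2.2)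
  else st

def extract_all_entities_py (query_results : List (List (String × String))) : List (String × List String) :=
  let st := query_results.foldl (fun st result => result.foldl pvStepA st)
    (PySem.Set.empty, PySem.Set.empty, PySem.Set.empty, PySem.Set.empty)
  -- return {k: sorted(list(v)) for k, v in entities.items()}
  [("classes", PySem.List.sorted st.1 (fun x => x) false),
   ("functions", PySem.List.sorted st.2.1 (fun x => x) false),
   ("methods", PySem.List.sorted st.2.2.1 (fun x => x) false),
   ("modules", PySem.List.sorted st.2.2.2 (fun x => x) false),
   ("files", PySem.List.sorted (PySem.Set.empty : PySem.Set String) (fun x => x) false)]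

-- ===== PORT B =====
def pvCategory (key : String) : Option String :=
  if key == "c" || key == "name" || key == "target" || key == "source" then some "classes"
  else if key == "module" then some "modules"
  else
    let kl := PySem.Str.lower key
    if PySem.Str.isIn "function" kl then some "functions"
    else if PySem.Str.isIn "method" kl then some "methods"
    else none

def extract_all_entities_py_alt (query_results : List (List (String × String))) : List (String × List String) :=
  let pairs := query_results.flatMap
    (fun r => r.filter (fun p => !(p.2 == "") && !(p.2 == "None")))
  ["classes", "functions", "methods", "modules", "files"].map (fun cat =>
    (cat, PySem.List.sorted
      (PySem.List.dedup ((pairs.filter (fun p => pvCategory p.1 == some cat)).map (·.2)))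
      (fun x => x) false))

-- ===== PRECONDITION & SPEC =====
def Spec_extract_all_entities_py (query_results : List (List (String × String))) (out : List (String × List String)) : Prop := out = extract_all_entities_py_alt query_results
instance (query_results : List (List (String × String))) (out : List (String × List String)) : Decidable (Spec_extract_all_entities_py query_results out) := by unfold Spec_extract_all_entities_py; infer_instance

-- ===== CLAIM (what is proved, stated in full; the proofs are below) =====
def Claim_equal_extract_all_entities_py : Prop := ∀ (query_results : List (List (String × String))), Dom_extract_all_entities_py query_results → Spec_extract_all_entities_py query_results (extract_all_entities_py query_results)

-- ===== LEMMAS AND PROOFS =====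

-- the values B collects for category `cat` out of one result row
def pvVals (cat : String) (r : List (String × String)) : List String :=
  ((r.filter (fun p => !(p.2 == "") && !(p.2 == "None"))).filter
    (fun p => pvCategory p.1 == some cat)).map (·.2)

lemma pvVals_cons (cat : String) (p : String × String) (ps : List (String × String)) :
    pvVals cat (p :: ps) =
      if (!(p.2 == "") && !(p.2 == "None")) && (pvCategory p.1 == some cat)
      then p.2 :: pvVals cat ps else pvVals cat ps := by
  by_cases hv : (!(p.2 == "") && !(p.2 == "None")) = true <;>
    by_cases hc : (pvCategory p.1 == some cat) = true <;>
      simp [pvVals, hv, hc]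

-- invariant of A's inner loop over one result row
lemma pvInner (r : List (String × String))
    (c f m mo : PySem.Set String) :
    r.foldl pvStepA (c, f, m, mo) =
      (PySem.Set.update c (pvVals "classes" r),
       PySem.Set.update f (pvVals "functions" r),
       PySem.Set.update m (pvVals "methods" r),
       PySem.Set.update mo (pvVals "modules" r)) := by
  induction r generalizing c f m mo with
  | nil => rfl
  | cons p ps ih =>
    simp only [List.foldl_cons, pvVals_cons, pvStepA]
    by_cases h0 : (p.2 == "" || p.2 == "None") = true
    · have hv : (!(p.2 == "") && !(p.2 == "None")) = false := by
        rcases Bool.or_eq_true_iff.mp h0 with h | h <;> simp [h]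
      rw [if_pos h0]
      simp [hv, ih]
    · have hv : (!(p.2 == "") && !(p.2 == "None")) = true := by
        simp only [Bool.or_eq_true_iff, not_or] at h0
        simp [h0.1, h0.2]
      rw [if_neg h0]
      by_cases h1 : (p.1 == "c" || p.1 == "name" || p.1 == "target" || p.1 == "source") = true
      · have hc : pvCategory p.1 = some "classes" := by
          simp only [pvCategory]; rw [if_pos h1]
        rw [if_pos h1]
        simp [hv, hc, ih]
      · rw [if_neg h1]
        by_cases h2 : (p.1 == "module") = true
        · have hc : pvCategory p.1 = some "modules" := by
            simp only [pvCategory]; rw [if_neg h1, if_pos h2]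
          rw [if_pos h2]
          simp [hv, hc, ih]
        · rw [if_neg h2]
          by_cases h3 : PySem.Str.isIn "function" (PySem.Str.lower p.1) = true
          · have hc : pvCategory p.1 = some "functions" := by
              simp only [pvCategory]; rw [if_neg h1, if_neg h2, if_pos h3]
            rw [if_pos h3]
            simp [hv, hc, ih]
          · rw [if_neg h3]
            by_cases h4 : PySem.Str.isIn "method" (PySem.Str.lower p.1) = true
            · have hc : pvCategory p.1 = some "methods" := by
                simp only [pvCategory]; rw [if_neg h1, if_neg h2, if_neg h3, if_pos h4]
              rw [if_pos h4]
              simp [hv, hc, ih]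
            · have hc : pvCategory p.1 = none := by
                simp only [pvCategory]; rw [if_neg h1, if_neg h2, if_neg h3, if_neg h4]
              rw [if_neg h4]
              simp [hv, hc, ih]

-- value lists for category `cat` over the whole input
def pvValsAll (cat : String) (qr : List (List (String × String))) : List String :=
  ((qr.flatMap (fun r => r.filter (fun p => !(p.2 == "") && !(p.2 == "None")))).filter
    (fun p => pvCategory p.1 == some cat)).map (·.2)

lemma pvValsAll_cons (cat : String) (r : List (String × String)) (qr : List (List (String × String))) :
    pvValsAll cat (r :: qr) = pvVals cat r ++ pvValsAll cat qr := by
  simp [pvValsAll, pvVals, List.filter_append]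

lemma pvOuter (qr : List (List (String × String)))
    (c f m mo : PySem.Set String) :
    qr.foldl (fun st result => result.foldl pvStepA st) (c, f, m, mo) =
      (PySem.Set.update c (pvValsAll "classes" qr),
       PySem.Set.update f (pvValsAll "functions" qr),
       PySem.Set.update m (pvValsAll "methods" qr),
       PySem.Set.update mo (pvValsAll "modules" qr)) := by
  induction qr generalizing c f m mo with
  | nil => rfl
  | cons r qrs ih =>
    simp only [List.foldl_cons, pvInner, ih, pvValsAll_cons, PySem.Set.update,
      List.foldl_append]

lemma pvCategory_ne_files (k : String) : (pvCategory k == some "files") = false := by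
  simp only [pvCategory]
  split_ifs <;> simp

lemma pvFilter_files (l : List (String × String)) :
    l.filter (fun p => pvCategory p.1 == some "files") = [] := by
  rw [List.filter_eq_nil_iff]
  intro p _
  simp [pvCategory_ne_files]

lemma pvUpdate_empty_eq_dedup (l : List String) :
    PySem.Set.update PySem.Set.empty l = PySem.List.dedup l := by
  simp [PySem.Set.update, PySem.Set.empty, PySem.List.dedup_eq_ofList, PySem.Set.ofList_eq_foldl]

-- ===== VERDICT (by name: the statement is the Claim_ definition above) =====
theorem extract_all_entities_py_spec : Claim_equal_extract_all_entities_py := by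
  intro qr _
  show extract_all_entities_py qr = extract_all_entities_py_alt qr
  unfold extract_all_entities_py extract_all_entities_py_alt
  simp only [pvOuter, pvUpdate_empty_eq_dedup, List.map_cons, List.map_nil,
    pvFilter_files, List.map_nil, pvValsAll]
  rfl
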